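-- pv_equiv track=rewrite | github.com/oss-materijali/vjezbe | SRC103-UUP/vjezba_09/vj9zad3.py | function
-- ===== SOURCE A (Python) =====
-- def function(list=[]):
--     all_equal = True
--     atleast_2_equal = 0
--
--     for i in range(len(list)):
--         for j in range(len(list)):
--             if i == j:
--                 continue
--
--             if list[i] != list[j]:
--                 all_equal = False
--
--             if list[i] == list[j]:
--                 atleast_2_equal += 1
--
--     if atleast_2_equal >= 2:
--         atleast_2_equal = True
--     else:
--         atleast_2_equal = False
--
--     return all_equal, atleast_2_equal
-- ===== SOURCE B (Python) =====
-- def function(list=[]):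
--     all_equal = all(x == list[0] for x in list)
--     has_dup = any(list.count(x) > 1 for x in list)
--     return all_equal, has_dup
-- ===== Notes on version B (the rewrite author's own statement) =====
-- stated objective: simpler
-- what changed: Replaces the fused all-pairs double loop (pair counting plus inequality flag) by two independent short-circuiting passes: compare-each-element-to-the-first for all_equal, and a per-element count for duplicate detection.
import Mathlib
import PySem

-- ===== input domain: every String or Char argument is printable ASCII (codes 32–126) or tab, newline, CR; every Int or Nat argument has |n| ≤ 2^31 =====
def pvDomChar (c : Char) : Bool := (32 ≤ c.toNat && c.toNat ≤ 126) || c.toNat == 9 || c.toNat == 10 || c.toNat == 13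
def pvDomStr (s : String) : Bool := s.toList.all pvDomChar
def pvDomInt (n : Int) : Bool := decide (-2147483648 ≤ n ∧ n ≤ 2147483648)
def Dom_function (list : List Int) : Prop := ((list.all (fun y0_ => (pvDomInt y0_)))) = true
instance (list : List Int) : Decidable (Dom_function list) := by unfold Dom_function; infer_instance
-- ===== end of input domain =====

-- B replaces A's fused all-pairs double loop by two independent single-shape passes
-- (compare-to-first for all_equal; per-element count for duplicate detection): simpler.

-- ===== PORT A =====
def function (list : List Int) : Bool × Bool :=
  let s := (PySem.List.pyRange 0 (list.length : Int) 1).foldl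
    (fun (s : Bool × Int) (i : Int) =>
      (PySem.List.pyRange 0 (list.length : Int) 1).foldl
        (fun (t : Bool × Int) (j : Int) =>
          if i == j then t
          else
            let t1 := if PySem.List.pyGetD list i 0 != PySem.List.pyGetD list j 0 then (false, t.2) else t
            if PySem.List.pyGetD list i 0 == PySem.List.pyGetD list j 0 then (t1.1, t1.2 + 1) else t1)
        s)
    (true, (0 : Int))
  (s.1, decide (s.2 ≥ 2))

-- ===== PORT B =====
-- `list[0]` is only evaluated when the generator produces an element, i.e. list ≠ [];
-- there it is the head, so it is ported as list.headD 0 (the default is never used).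
def function_alt (list : List Int) : Bool × Bool :=
  let all_equal := list.all (fun x => x == list.headD 0)
  let has_dup := list.any (fun x => decide ((PySem.List.count list x : Int) > 1))
  (all_equal, has_dup)

-- ===== PRECONDITION & SPEC =====
def Spec_function (list : List Int) (out : Bool × Bool) : Prop := out = function_alt list
instance (list : List Int) (out : Bool × Bool) : Decidable (Spec_function list out) := by unfold Spec_function; infer_instance

-- ===== CLAIM (what is proved, stated in full; the proofs are below) =====
def Claim_equal_function : Prop := ∀ (list : List Int), Dom_function list → Spec_function list (function list)

-- ===== LEMMAS AND PROOFS =====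

-- the inner `for j` loop: conjoins the inner all-equal check, adds the matching-j count
lemma inner_loop (l : List Int) (i : Int) (L : List Int) (b : Bool) (c : Int) :
    L.foldl
        (fun (t : Bool × Int) (j : Int) =>
          if i == j then t
          else
            let t1 := if PySem.List.pyGetD l i 0 != PySem.List.pyGetD l j 0 then (false, t.2) else t
            if PySem.List.pyGetD l i 0 == PySem.List.pyGetD l j 0 then (t1.1, t1.2 + 1) else t1)
        (b, c)
    = (b && L.all (fun j => i == j || PySem.List.pyGetD l i 0 == PySem.List.pyGetD l j 0),
       c + (L.countP (fun j => !(i == j) && (PySem.List.pyGetD l i 0 == PySem.List.pyGetD l j 0)) : Int)) := by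
  induction L generalizing b c with
  | nil => simp
  | cons a L ih =>
    rw [List.foldl_cons]
    by_cases hij : i == a
    · have e : (if i == a then (b, c)
          else
            let t1 := if PySem.List.pyGetD l i 0 != PySem.List.pyGetD l a 0 then (false, c) else (b, c)
            if PySem.List.pyGetD l i 0 == PySem.List.pyGetD l a 0 then (t1.1, t1.2 + 1) else t1) = (b, c) := by
        simp [hij]
      rw [e, ih]
      simp [hij, List.all_cons]
    · by_cases hv : PySem.List.pyGetD l i 0 == PySem.List.pyGetD l a 0
      · have e : (if i == a then (b, c)
            else
              let t1 := if PySem.List.pyGetD l i 0 != PySem.List.pyGetD l a 0 then (false, c) else (b, c)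
              if PySem.List.pyGetD l i 0 == PySem.List.pyGetD l a 0 then (t1.1, t1.2 + 1) else t1) = (b, c + 1) := by
          simp [hij, hv, bne]
        rw [e, ih]
        simp only [List.all_cons, List.countP_cons, hij, hv, Prod.mk.injEq]
        refine ⟨by simp, by simp; ring⟩
      · have e : (if i == a then (b, c)
            else
              let t1 := if PySem.List.pyGetD l i 0 != PySem.List.pyGetD l a 0 then (false, c) else (b, c)
              if PySem.List.pyGetD l i 0 == PySem.List.pyGetD l a 0 then (t1.1, t1.2 + 1) else t1) = (false, c) := by
          simp [hij, hv, bne]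
        rw [e, ih]
        simp [hij, hv, List.all_cons]

-- the outer `for i` loop
lemma outer_loop (l : List Int) (R : List Int) (L : List Int) (b : Bool) (c : Int) :
    L.foldl
      (fun (s : Bool × Int) (i : Int) =>
        R.foldl
          (fun (t : Bool × Int) (j : Int) =>
            if i == j then t
            else
              let t1 := if PySem.List.pyGetD l i 0 != PySem.List.pyGetD l j 0 then (false, t.2) else t
              if PySem.List.pyGetD l i 0 == PySem.List.pyGetD l j 0 then (t1.1, t1.2 + 1) else t1)
          s)
      (b, c)
    = (b && L.all (fun i => R.all (fun j => i == j || PySem.List.pyGetD l i 0 == PySem.List.pyGetD l j 0)),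
       c + ((L.map (fun i => R.countP (fun j => !(i == j) && (PySem.List.pyGetD l i 0 == PySem.List.pyGetD l j 0)))).sum : Int)) := by
  induction L generalizing b c with
  | nil => simp
  | cons a L ih =>
    simp only [List.foldl_cons, List.all_cons, List.map_cons, List.sum_cons]
    rw [inner_loop, ih]
    simp only [Prod.mk.injEq]
    refine ⟨by simp [Bool.and_assoc], by push_cast; ring⟩

-- generic list helpers

lemma two_le_countP_of {α : Type} [DecidableEq α] {L : List α} {p : α → Bool} {a b : α}
    (ha : a ∈ L) (hb : b ∈ L) (hne : a ≠ b) (hpa : p a = true) (hpb : p b = true) :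
    2 ≤ L.countP p := by
  have h1 : L.Perm (a :: L.erase a) := List.perm_cons_erase ha
  have hb' : b ∈ L.erase a := (List.mem_erase_of_ne (Ne.symm hne)).mpr hb
  have h2 : (L.erase a).Perm (b :: (L.erase a).erase b) := List.perm_cons_erase hb'
  rw [h1.countP_eq p, List.countP_cons, h2.countP_eq p, List.countP_cons]
  simp [hpa, hpb]

lemma exists_two_of_two_le_countP {α : Type} {L : List α} {p : α → Bool}
    (hnd : L.Nodup) (h : 2 ≤ L.countP p) :
    ∃ a b, a ∈ L ∧ b ∈ L ∧ a ≠ b ∧ p a = true ∧ p b = true := by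
  induction L with
  | nil => simp at h
  | cons a L ih =>
    rcases List.nodup_cons.mp hnd with ⟨hniL, hndL⟩
    rw [List.countP_cons] at h
    by_cases hpa : p a = true
    · rw [if_pos hpa] at h
      have h1 : 0 < L.countP p := by omega
      rcases List.countP_pos_iff.mp h1 with ⟨b, hbL, hpb⟩
      exact ⟨a, b, List.mem_cons_self, List.mem_cons_of_mem _ hbL,
        fun he => hniL (he ▸ hbL), hpa, hpb⟩
    · rw [if_neg hpa] at h
      have h2 : 2 ≤ L.countP p := by omega
      rcases ih hndL h2 with ⟨x, y, hx, hy, hxy, hpx, hpy⟩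
      exact ⟨x, y, List.mem_cons_of_mem _ hx, List.mem_cons_of_mem _ hy, hxy, hpx, hpy⟩

lemma single_le_sum_map {α : Type} [DecidableEq α] {L : List α} (f : α → Nat) {a : α}
    (ha : a ∈ L) : f a ≤ (L.map f).sum := by
  have h1 : L.Perm (a :: L.erase a) := List.perm_cons_erase ha
  rw [(h1.map f).sum_eq]
  simp

lemma two_le_sum_map {α : Type} [DecidableEq α] {L : List α} (f : α → Nat) {a b : α}
    (ha : a ∈ L) (hb : b ∈ L) (hne : a ≠ b) : f a + f b ≤ (L.map f).sum := by
  have h1 : L.Perm (a :: L.erase a) := List.perm_cons_erase ha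
  have hb' : b ∈ L.erase a := (List.mem_erase_of_ne (Ne.symm hne)).mpr hb
  rw [(h1.map f).sum_eq, List.map_cons, List.sum_cons]
  exact Nat.add_le_add_left (single_le_sum_map f hb') _

lemma exists_pos_of_sum_pos {α : Type} {L : List α} {f : α → Nat}
    (h : 1 ≤ (L.map f).sum) : ∃ a ∈ L, 1 ≤ f a := by
  by_contra hc
  push Not at hc
  have hz : (L.map f).sum = 0 := List.sum_eq_zero (by
    intro x hx
    rcases List.mem_map.mp hx with ⟨a, haL, rfl⟩
    exact Nat.lt_one_iff.mp (hc a haL))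
  omega

-- Python count as a countP over the index range
lemma count_eq_countP_range (l : List Int) (x : Int) :
    List.count x l
      = (PySem.List.pyRange 0 (l.length : Int) 1).countP (fun j => PySem.List.pyGetD l j 0 == x) := by
  conv_lhs => rw [← PySem.List.map_pyGetD_pyRange_zero' l 0]
  rw [List.count_eq_countP, List.countP_map]; rfl

-- membership of an indexed element
lemma pyGetD_mem {l : List Int} {i : Int} (h0 : 0 ≤ i) (h1 : i < (l.length : Int)) :
    PySem.List.pyGetD l i 0 ∈ l := by
  rw [PySem.List.pyGetD_eq_getElem l 0 h0 h1]
  exact List.getElem_mem _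

-- Part 1: A's all_equal flag equals B's compare-to-first pass
lemma allA (l : List Int) :
    ((PySem.List.pyRange 0 (l.length : Int) 1).all fun i =>
        (PySem.List.pyRange 0 (l.length : Int) 1).all fun j =>
          i == j || PySem.List.pyGetD l i 0 == PySem.List.pyGetD l j 0)
    = l.all (fun x => x == l.headD 0) := by
  rw [Bool.eq_iff_iff]
  simp only [List.all_eq_true, PySem.List.mem_pyRange_one, Bool.or_eq_true, beq_iff_eq]
  constructor
  · intro H x hx
    rcases List.getElem_of_mem hx with ⟨k, hk, rfl⟩
    have hlen : 0 < l.length := by omega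
    have hhead : l.headD 0 = l[0]'(by omega) := by
      cases l with
      | nil => simp at hk
      | cons a t => rfl
    have := H (k : Int) ⟨Int.natCast_nonneg k, by exact_mod_cast hk⟩ 0 ⟨le_refl 0, by exact_mod_cast (by omega : 0 < l.length)⟩
    rcases this with he | he
    · have : k = 0 := by exact_mod_cast he
      subst this
      rw [hhead]
    · rw [PySem.List.pyGetD_eq_getElem l 0 (Int.natCast_nonneg k) (by exact_mod_cast hk),
          PySem.List.pyGetD_eq_getElem l 0 (le_refl 0) (by exact_mod_cast (by omega : 0 < l.length))] at he
      rw [hhead]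
      exact he
  · intro H i ⟨hi0, hi1⟩ j ⟨hj0, hj1⟩
    right
    have h1 := H _ (pyGetD_mem hi0 hi1)
    have h2 := H _ (pyGetD_mem hj0 hj1)
    rw [h1, h2]

-- Part 2: A's ordered-equal-pair count is ≥ 2 iff some element has count > 1
lemma dupA (l : List Int) :
    decide ((2:Int) ≤ ((List.map (fun i =>
        List.countP (fun j => !(i == j) && (PySem.List.pyGetD l i 0 == PySem.List.pyGetD l j 0))
          (PySem.List.pyRange 0 (l.length : Int) 1))
        (PySem.List.pyRange 0 (l.length : Int) 1)).sum : Int))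
    = l.any fun x => decide ((1:Int) < (PySem.List.count l x : Int)) := by
  rw [Bool.eq_iff_iff]
  simp only [decide_eq_true_iff, List.any_eq_true, PySem.List.count_eq]
  constructor
  · intro h
    have h2 : 2 ≤ (List.map (fun i =>
        List.countP (fun j => !(i == j) && (PySem.List.pyGetD l i 0 == PySem.List.pyGetD l j 0))
          (PySem.List.pyRange 0 (l.length : Int) 1))
        (PySem.List.pyRange 0 (l.length : Int) 1)).sum := by exact_mod_cast h
    have h1 : 1 ≤ (List.map (fun i =>
        List.countP (fun j => !(i == j) && (PySem.List.pyGetD l i 0 == PySem.List.pyGetD l j 0))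
          (PySem.List.pyRange 0 (l.length : Int) 1))
        (PySem.List.pyRange 0 (l.length : Int) 1)).sum := by omega
    rcases exists_pos_of_sum_pos h1 with ⟨i, hiR, hfi⟩
    rcases List.countP_pos_iff.mp (show 0 < List.countP (fun j => !(i == j) && (PySem.List.pyGetD l i 0 == PySem.List.pyGetD l j 0)) (PySem.List.pyRange 0 (l.length : Int) 1) by omega) with ⟨j, hjR, hp⟩
    simp only [Bool.and_eq_true] at hp
    rcases hp with ⟨hij, hv⟩
    rcases PySem.List.mem_pyRange_one.mp hiR with ⟨hi0, hi1⟩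
    rcases PySem.List.mem_pyRange_one.mp hjR with ⟨hj0, hj1⟩
    refine ⟨PySem.List.pyGetD l i 0, pyGetD_mem hi0 hi1, ?_⟩
    have hij' : i ≠ j := by simpa using hij
    have hcnt : 2 ≤ List.count (PySem.List.pyGetD l i 0) l := by
      rw [count_eq_countP_range]
      exact two_le_countP_of hiR hjR hij' (by simp) (by rw [beq_iff_eq] at hv ⊢; omega)
    exact_mod_cast hcnt
  · intro ⟨x, hxl, hcx⟩
    have hcx' : 2 ≤ List.count x l := by exact_mod_cast hcx
    rw [count_eq_countP_range] at hcx'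
    rcases exists_two_of_two_le_countP (PySem.List.nodup_pyRange_one _ _) hcx' with
      ⟨i, j, hiR, hjR, hij, hpi, hpj⟩
    rw [beq_iff_eq] at hpi hpj
    have hfi : 1 ≤ List.countP (fun j' => !(i == j') && (PySem.List.pyGetD l i 0 == PySem.List.pyGetD l j' 0))
        (PySem.List.pyRange 0 (l.length : Int) 1) :=
      List.countP_pos_iff.mpr ⟨j, hjR, by simp [hij, hpi, hpj]⟩
    have hfj : 1 ≤ List.countP (fun j' => !(j == j') && (PySem.List.pyGetD l j 0 == PySem.List.pyGetD l j' 0))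
        (PySem.List.pyRange 0 (l.length : Int) 1) :=
      List.countP_pos_iff.mpr ⟨i, hiR, by simp [Ne.symm hij, hpi, hpj]⟩
    have := two_le_sum_map (fun i =>
        List.countP (fun j => !(i == j) && (PySem.List.pyGetD l i 0 == PySem.List.pyGetD l j 0))
          (PySem.List.pyRange 0 (l.length : Int) 1)) hiR hjR hij
    beta_reduce at this
    have h2 : 2 ≤ (List.map (fun i =>
        List.countP (fun j => !(i == j) && (PySem.List.pyGetD l i 0 == PySem.List.pyGetD l j 0))
          (PySem.List.pyRange 0 (l.length : Int) 1))
        (PySem.List.pyRange 0 (l.length : Int) 1)).sum := by omega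
    exact_mod_cast h2

-- ===== VERDICT (by name: the statement is the Claim_ definition above) =====
theorem function_spec : Claim_equal_function := by
  intro l _
  unfold Spec_function function function_alt
  simp only [outer_loop, Bool.true_and, zero_add]
  rw [Prod.mk.injEq]
  constructor
  · exact allA l
  · rw [← dupA l]
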